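-- pv_equiv track=rewrite | github.com/drjmcauliffe/pyops | epys/edf.py | _concatenate_lines
-- ===== SOURCE A (Python) =====
-- def _concatenate_lines(content):
--     out = list()
--     line = ""
--     for l in content:
--         # Concatening lines if '\' found
--         if '\\' in l and '#' not in l[0] and \
--            '\\' not in l[l.index('\\') + 1]:
--             line += ' ' + l[:l.index('\\')]
--             # Continues with the next iteration of the loop
--             continue
--
--         # If there was no concatenation of lines
--         if len(line) == 0:
--             line = l
--         # If we were concatenating, we concatenate the last one
--         else:
--             if '#' in l:
--                 line += ' ' + l[:l.index('#')]
--             else: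
--                 line += ' ' + l
--
--         if line[0] == '\n':
--             out.append(line)
--         else:
--             out.append(' '.join(line.split()))
--         line = ""
--     return out
-- ===== SOURCE B (Python) =====
-- def _concatenate_lines(content):
--     # Run-based scan: advance an index over maximal runs of continuation lines plus
--     # their terminating line, assemble each logical line in one join over the run's
--     # slices, normalize it, and move to the next run (an unterminated trailing run
--     # yields nothing).
--     def is_cont(l):
--         return '\\' in l and l[0] != '#' and l[l.index('\\') + 1] != '\\'
--
--     def norm(line):
--         return line if line[0] == '\n' else ' '.join(line.split())
--
--     out = []
--     i, n = 0, len(content)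
--     while i < n:
--         j = i
--         while j < n and is_cont(content[j]):
--             j += 1
--         if j == n:
--             break
--         last = content[j]
--         if j == i:
--             logical = last
--         else:
--             tail = last[:last.index('#')] if '#' in last else last
--             logical = ''.join(' ' + content[t][:content[t].index('\\')]
--                               for t in range(i, j)) + ' ' + tail
--         out.append(norm(logical))
--         i = j + 1
--     return out
-- ===== Notes on version B (the rewrite author's own statement) =====
-- stated objective: alternative
-- what changed: B replaces A's single stateful loop with its mutable flush buffer by a run-based scan: an index walks over each maximal run of continuation lines plus its terminator, the logical line is assembled in one join over the run's slices, normalized, and the scan jumps past the run.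
import Mathlib
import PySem

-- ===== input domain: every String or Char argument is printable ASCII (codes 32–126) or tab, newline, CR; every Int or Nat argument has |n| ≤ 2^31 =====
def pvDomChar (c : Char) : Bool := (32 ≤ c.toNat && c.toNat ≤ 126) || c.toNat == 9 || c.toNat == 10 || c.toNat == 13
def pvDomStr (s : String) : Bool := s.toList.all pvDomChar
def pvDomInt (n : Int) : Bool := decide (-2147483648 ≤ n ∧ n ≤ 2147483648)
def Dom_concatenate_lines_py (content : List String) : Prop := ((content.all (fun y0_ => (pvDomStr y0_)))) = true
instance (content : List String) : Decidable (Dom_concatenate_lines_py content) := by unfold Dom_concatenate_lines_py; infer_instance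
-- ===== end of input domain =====

-- B is an alternative to A: A fuses grouping and normalization in one stateful loop with a
-- mutable flush buffer; B scans run by run, assembling each logical line (one maximal run of
-- continuation lines plus its terminator) in a single join, then jumping past the run.

-- ===== PORT A =====
-- A's loop: 'line' is the accumulation buffer, 'out' the results so far; 'none' = the loop raises
-- (IndexError on l[l.index('\\')+1] for a trailing lone backslash, or on line[0] for an empty line).
def pvALoop : List String → List Char → List String → Option (List String)
  | [], _line, out => some out
  | l :: rest, line, out =>
    let cs := l.toList
    let idx := PySem.Chars.find cs ['\\']
    -- '\\' in l and '#' not in l[0] and '\\' not in l[l.index('\\') + 1]  (short-circuit; none = IndexError)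
    match (if PySem.Chars.isIn ['\\'] cs && !(PySem.List.pyGet? cs 0 == some '#')
           then (PySem.List.pyGet? cs (idx + 1)).map (fun c => c != '\\')
           else some false) with
    | none => none
    | some true =>
        -- line += ' ' + l[:l.index('\\')]; continue
        pvALoop rest (line ++ ' ' :: PySem.Chars.slice cs none (some idx)) out
    | some false =>
        let line2 :=
          if line.isEmpty then cs
          else if PySem.Chars.isIn ['#'] cs
               then line ++ ' ' :: PySem.Chars.slice cs none (some (PySem.Chars.find cs ['#']))
               else line ++ ' ' :: cs
        match PySem.List.pyGet? line2 0 with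
        | none => none   -- line[0] IndexError on the empty logical line
        | some c0 =>
            let item := if c0 = '\n' then line2
                        else PySem.Chars.join [' '] (PySem.Chars.split₀ line2)
            pvALoop rest [] (out ++ [String.ofList item])

def concatenate_lines_py (content : List String) : List String :=
  (pvALoop content [] []).getD []

-- ===== PORT B =====
-- Source B's is_cont: '\\' in l and l[0] != '#' and l[l.index('\\')+1] != '\\'
def pvContB (cs : List Char) : Bool :=
  PySem.Chars.isIn ['\\'] cs
  && !(PySem.List.pyGet? cs 0 == some '#')
  && !(PySem.List.pyGet? cs (PySem.Chars.find cs ['\\'] + 1) == some '\\')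

-- Source B's norm: 'line if line[0] == '\n' else ' '.join(line.split())'
def pvNorm (line : List Char) : List Char :=
  if PySem.List.pyGet? line 0 == some '\n' then line
  else PySem.Chars.join [' '] (PySem.Chars.split₀ line)

-- Source B's outer while loop over runs becomes recursion on the remaining suffix; the inner
-- while loop finding the run i..j is takeWhile/dropWhile; the ''.join over the run is the flatMap.
def pvRecB (rest : List (List Char)) : List (List Char) :=
  match h : rest.dropWhile pvContB with
  | [] => []
  | last :: tail =>
    let pre := rest.takeWhile pvContB
    let logical :=
      if pre = [] then last
      else pre.flatMap (fun l => ' ' :: PySem.Chars.slice l none (some (PySem.Chars.find l ['\\'])))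
           ++ ' ' :: (if PySem.Chars.isIn ['#'] last
                      then PySem.Chars.slice last none (some (PySem.Chars.find last ['#']))
                      else last)
    pvNorm logical :: pvRecB tail
termination_by rest.length
decreasing_by
  have hle := List.length_dropWhile_le pvContB rest
  rw [h] at hle
  simp at hle
  omega

def concatenate_lines_py_alt (content : List String) : List String :=
  (pvRecB (content.map String.toList)).map String.ofList

-- ===== PRECONDITION & SPEC =====
-- Python A raises IndexError (and so does B) on a line whose first backslash is its last character
-- (unless the line starts with '#'), and on an empty line that does not continue a backslash
-- continuation; Pre_ excludes exactly those inputs.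
def pvBsOk (cs : List Char) : Bool :=
  !(PySem.Chars.isIn ['\\'] cs)
  || (PySem.List.pyGet? cs 0 == some '#')
  || decide (PySem.Chars.find cs ['\\'] + 1 < (cs.length : Int))

def Pre_concatenate_lines_py (content : List String) : Prop :=
  (∀ l ∈ content, pvBsOk l.toList = true) ∧
  (∀ p ∈ List.zip ("#" :: content) content, p.2.toList = [] → pvContB p.1.toList = true)
instance (content : List String) : Decidable (Pre_concatenate_lines_py content) := by
  unfold Pre_concatenate_lines_py; infer_instance

def pvWitness_concatenate_lines_py : List String := ["a \\x", "", "b  c # d", "# e"]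

def Spec_concatenate_lines_py (content : List String) (out : List String) : Prop := out = concatenate_lines_py_alt content
instance (content : List String) (out : List String) : Decidable (Spec_concatenate_lines_py content out) := by unfold Spec_concatenate_lines_py; infer_instance

-- ===== CLAIM (what is proved, stated in full; the proofs are below) =====
def Claim_equal_concatenate_lines_py : Prop := ∀ (content : List String), Dom_concatenate_lines_py content → Pre_concatenate_lines_py content → Spec_concatenate_lines_py content (concatenate_lines_py content)

-- ===== LEMMAS AND PROOFS =====

-- Proof-side accumulator semantics bridging A's buffer loop and B's run recursion:
-- pvGroup assembles the logical lines the way A's buffer does.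
def pvGroup : List (List Char) → List Char → List (List Char)
  | [], _buf => []
  | cs :: rest, buf =>
    if pvContB cs then
      pvGroup rest (buf ++ ' ' :: PySem.Chars.slice cs none (some (PySem.Chars.find cs ['\\'])))
    else
      let line :=
        if buf.isEmpty then cs
        else buf ++ ' ' :: (if PySem.Chars.isIn ['#'] cs
                            then PySem.Chars.slice cs none (some (PySem.Chars.find cs ['#']))
                            else cs)
      line :: pvGroup rest []

-- the logical line produced from buffer 'buf', continuation run 'pre' and terminator 'last'
def pvLogical (buf : List Char) (pre : List (List Char)) (last : List Char) : List Char :=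
  if buf.isEmpty ∧ pre = [] then last
  else buf ++ pre.flatMap (fun l => ' ' :: PySem.Chars.slice l none (some (PySem.Chars.find l ['\\'])))
       ++ ' ' :: (if PySem.Chars.isIn ['#'] last
                  then PySem.Chars.slice last none (some (PySem.Chars.find last ['#']))
                  else last)

-- pyGet? returns a value at any in-range nonnegative index
lemma pv_pyGet?_some (cs : List Char) (i : Int) (h0 : 0 ≤ i) (h : i < cs.length) :
    PySem.List.pyGet? cs i = some (cs[i.toNat]'(by omega)) := by
  have hi : i.toNat < cs.length := by omega
  simp only [PySem.List.pyGet?, PySem.List.pyIdx?, if_pos h0, if_pos h, Option.bind_some,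
    List.getElem?_eq_getElem hi]

lemma pv_pyGet?_cons_zero (d : Char) (ds : List Char) :
    PySem.List.pyGet? (d :: ds) 0 = some d := by
  simp [PySem.List.pyGet?, PySem.List.pyIdx?]

-- equation lemmas for pvRecB
lemma pvRecB_drop_nil (rest : List (List Char)) (h : rest.dropWhile pvContB = []) :
    pvRecB rest = [] := by
  rw [pvRecB]
  split
  · rfl
  · rename_i last tail h2; rw [h] at h2; cases h2

lemma pvRecB_drop_cons (rest last : _) (tail : List (List Char))
    (h : rest.dropWhile pvContB = last :: tail) :
    pvRecB rest = pvNorm (pvLogical [] (rest.takeWhile pvContB) last) :: pvRecB tail := by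
  rw [pvRecB]
  split
  · rename_i h2; rw [h] at h2; cases h2
  · rename_i l t h2
    rw [h] at h2
    injection h2 with h3 h4
    subst h3; subst h4
    unfold pvLogical
    by_cases hp : rest.takeWhile pvContB = []
    · simp [hp]
    · simp [hp]

-- absorbing one continuation line into the buffer shifts it out of the run
lemma pvLogical_absorb (buf : List Char) (l : List Char) (pre : List (List Char)) (last : List Char) :
    pvLogical buf (l :: pre) last
      = pvLogical (buf ++ ' ' :: PySem.Chars.slice l none (some (PySem.Chars.find l ['\\']))) pre last := by
  unfold pvLogical
  split_ifs <;>
    simp_all [List.flatMap_cons, List.cons_append, List.append_assoc]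

-- pvGroup in terms of the run decomposition
lemma pvGroup_run : ∀ (content : List (List Char)) (buf : List Char),
    pvGroup content buf
      = match content.dropWhile pvContB with
        | [] => []
        | last :: tail => pvLogical buf (content.takeWhile pvContB) last :: pvGroup tail [] := by
  intro content
  induction content with
  | nil => intro buf; simp [pvGroup]
  | cons l rest ih =>
    intro buf
    by_cases hc : pvContB l = true
    · rw [List.dropWhile_cons_of_pos hc, List.takeWhile_cons_of_pos hc]
      show pvGroup (l :: rest) buf = _
      rw [pvGroup, if_pos hc, ih]
      cases hdrop : rest.dropWhile pvContB with
      | nil => rfl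
      | cons last tail => dsimp only; rw [pvLogical_absorb]
    · rw [List.dropWhile_cons_of_neg (by simp [hc]), List.takeWhile_cons_of_neg (by simp [hc])]
      show pvGroup (l :: rest) buf = _
      rw [pvGroup, if_neg hc]
      unfold pvLogical
      by_cases hb : buf.isEmpty
      · simp [List.isEmpty_iff.mp hb]
      · simp only [hb, List.flatMap_nil, List.append_nil]
        rw [if_neg (by simpa using hb)]
        split <;> rfl

-- B's run recursion computes exactly the normalized pvGroup lines (empty buffer)
lemma pv_bridge : ∀ (n : Nat) (content : List (List Char)), content.length ≤ n →
    (pvGroup content []).map pvNorm = pvRecB content := by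
  intro n
  induction n with
  | zero =>
    intro content h
    have : content = [] := List.eq_nil_of_length_eq_zero (by omega)
    subst this
    rw [pvRecB_drop_nil [] (by simp)]
    simp [pvGroup]
  | succ n ih =>
    intro content h
    rw [pvGroup_run]
    cases hdrop : content.dropWhile pvContB with
    | nil => rw [pvRecB_drop_nil content hdrop]; simp
    | cons last tail =>
      rw [pvRecB_drop_cons content last tail hdrop]
      simp only [List.map_cons]
      congr 1
      apply ih
      have hle := List.length_dropWhile_le pvContB content
      rw [hdrop] at hle
      simp at hle
      omega

-- the main invariant: A's fused loop equals the accumulator grouping + normalization, given that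
-- every line passes pvBsOk, every empty line follows a continuation line, and the buffer
-- is nonempty whenever the previous line was a continuation line.
lemma pv_main : ∀ (content : List String) (prev : String) (buf : List Char) (out : List String),
    (∀ l ∈ content, pvBsOk l.toList = true) →
    (∀ p ∈ List.zip (prev :: content) content, p.2.toList = [] → pvContB p.1.toList = true) →
    (pvContB prev.toList = true → buf ≠ []) →
    pvALoop content buf out
      = some (out ++ ((pvGroup (content.map String.toList) buf).map pvNorm).map String.ofList) := by
  intro content
  induction content with
  | nil => intro prev buf out _ _ _; simp [pvALoop, pvGroup]
  | cons l rest ih =>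
    intro prev buf out h1 h2 hinv
    have hbs : pvBsOk l.toList = true := h1 l (by simp)
    have h1' : ∀ x ∈ rest, pvBsOk x.toList = true := fun x hx => h1 x (by simp [hx])
    have h2' : ∀ p ∈ List.zip (l :: rest) rest, p.2.toList = [] → pvContB p.1.toList = true := by
      intro p hp
      exact h2 p (by rw [List.zip_cons_cons]; exact List.mem_cons_of_mem _ hp)
    by_cases hC : pvContB l.toList = true
    · -- continuation line: both sides accumulate into the buffer
      have h3 := hC
      simp only [pvContB, Bool.and_eq_true, Bool.not_eq_true', beq_eq_false_iff_ne] at h3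
      obtain ⟨⟨hin, hhd⟩, hnb⟩ := h3
      -- pvBsOk gives the bound: the char after the first backslash exists
      have hlt : PySem.Chars.find l.toList ['\\'] + 1 < (l.toList.length : Int) := by
        simp only [pvBsOk, Bool.or_eq_true, hin, Bool.not_true, Bool.false_or,
          decide_eq_true_eq] at hbs
        rcases hbs with h | h
        · exact absurd (by simpa using h) hhd
        · exact h
      have hge : (0 : Int) ≤ PySem.Chars.find l.toList ['\\'] + 1 := by
        have := (PySem.Chars.find_nonneg_iff l.toList ['\\']).mpr
          ((PySem.Chars.isIn_iff_infix _ _).mp hin)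
        omega
      have hsome := pv_pyGet?_some l.toList _ hge hlt
      have hne : l.toList[(PySem.Chars.find l.toList ['\\'] + 1).toNat]'(by omega) ≠ '\\' := by
        intro h; exact hnb (by rw [hsome, h])
      have hcond : (PySem.Chars.isIn ['\\'] l.toList
          && !(PySem.List.pyGet? l.toList 0 == some '#')) = true := by
        simp [hin, hhd]
      have hscrut : (if PySem.Chars.isIn ['\\'] l.toList
              && !(PySem.List.pyGet? l.toList 0 == some '#')
           then (PySem.List.pyGet? l.toList (PySem.Chars.find l.toList ['\\'] + 1)).map
                  (fun c => c != '\\')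
           else some false) = some true := by
        rw [if_pos hcond, hsome]
        simp [hne]
      simp only [pvALoop, pvGroup, List.map_cons, hscrut, hC, if_pos]
      exact ih l _ out h1' h2' (fun _ => by simp)
    · -- flush line: both sides emit the finished logical line
      have hstep : (if PySem.Chars.isIn ['\\'] l.toList
              && !(PySem.List.pyGet? l.toList 0 == some '#')
           then (PySem.List.pyGet? l.toList (PySem.Chars.find l.toList ['\\'] + 1)).map
                  (fun c => c != '\\')
           else some false) = some false := by
        by_cases hg : (PySem.Chars.isIn ['\\'] l.toList
            && !(PySem.List.pyGet? l.toList 0 == some '#')) = true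
        · rw [if_pos hg]
          have hb : PySem.List.pyGet? l.toList (PySem.Chars.find l.toList ['\\'] + 1)
              = some '\\' := by
            by_contra hh
            exact hC (by simp [pvContB, hg, hh])
          rw [hb]; simp
        · rw [if_neg hg]
      -- the assembled logical line is nonempty
      have hl2 : ∃ d ds, (if buf.isEmpty then l.toList
          else if PySem.Chars.isIn ['#'] l.toList
               then buf ++ ' ' :: PySem.Chars.slice l.toList none
                      (some (PySem.Chars.find l.toList ['#']))
               else buf ++ ' ' :: l.toList) = d :: ds := by
        by_cases hbuf : buf = []
        · subst hbuf
          have hle : l.toList ≠ [] := by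
            intro hemp
            have := h2 (prev, l) (by rw [List.zip_cons_cons]; exact List.mem_cons_self) hemp
            exact (hinv this) rfl
          simp only [List.isEmpty_nil, if_pos]
          cases hl : l.toList with
          | nil => exact absurd hl hle
          | cons d ds => exact ⟨d, ds, rfl⟩
        · rw [if_neg (by simpa using hbuf)]
          cases hb : buf with
          | nil => exact absurd hb hbuf
          | cons d ds => split <;> exact ⟨d, _, rfl⟩
      obtain ⟨d, ds, hl2⟩ := hl2
      -- pvGroup factors the ' '-cons out of the '#' test; same logical line
      have hl2b : (if buf.isEmpty then l.toList
          else buf ++ ' ' :: (if PySem.Chars.isIn ['#'] l.toList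
               then PySem.Chars.slice l.toList none (some (PySem.Chars.find l.toList ['#']))
               else l.toList)) = d :: ds := by
        rw [← hl2]; split_ifs <;> rfl
      simp only [pvALoop, pvGroup, List.map_cons, hstep, hC, if_neg,
        Bool.not_eq_true, hl2, hl2b, pv_pyGet?_cons_zero]
      have hrec := ih l [] (out ++ [String.ofList (if d = '\n' then d :: ds
        else PySem.Chars.join [' '] (PySem.Chars.split₀ (d :: ds)))]) h1' h2'
        (fun hc => absurd hc (by simp [hC]))
      rw [hrec, pvNorm, pv_pyGet?_cons_zero]
      simp only [beq_iff_eq, Option.some.injEq, List.append_assoc, List.singleton_append]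

-- ===== VERDICT (by name: the statement is the Claim_ definition above) =====
theorem concatenate_lines_py_spec : Claim_equal_concatenate_lines_py := by
  intro content _hdom hpre
  obtain ⟨h1, h2⟩ := hpre
  unfold Spec_concatenate_lines_py concatenate_lines_py concatenate_lines_py_alt
  rw [pv_main content "#" [] [] h1 h2 (fun hc => absurd hc (by decide)),
    pv_bridge (content.map String.toList).length _ le_rfl]
  simp
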